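-- pv_equiv track=rewrite | github.com/pypi-data/pypi-mirror-260 | packages/medisearch-client/medisearch_client-0.2.1.tar.gz/medisearch_client-0.2.1/medisearch_client/client.py | _filter_llm_responses
-- ===== SOURCE A (Python) =====
-- def _filter_llm_responses(
--     responses: list[dict[str, str]]) -> list[dict[str, str]]:
--   """Remove all but the last llm_response event from the responses."""
--   seen_llm_response = False
--   filtered_responses = []
--
--   for resp in reversed(responses):
--     if resp["event"] == "llm_response" and not seen_llm_response:
--       seen_llm_response = True
--       filtered_responses.append(resp)
--     elif resp["event"] != "llm_response":
--       filtered_responses.append(resp)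
--
--   return list(reversed(filtered_responses))
-- ===== SOURCE B (Python) =====
-- def _filter_llm_responses(
--     responses: list[dict[str, str]]) -> list[dict[str, str]]:
--   """Remove all but the last llm_response event from the responses."""
--   last_idx = -1
--   for i, resp in enumerate(responses):
--     if resp["event"] == "llm_response":
--       last_idx = i
--   return [resp for i, resp in enumerate(responses)
--           if resp["event"] != "llm_response" or i == last_idx]
-- ===== Notes on version B (the rewrite author's own statement) =====
-- stated objective: simpler
-- what changed: Replaces the reversed traversal with a seen-flag, append and final re-reverse by a forward pass that records the index of the last llm_response and a single forward index-conditioned filter.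
import Mathlib
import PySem

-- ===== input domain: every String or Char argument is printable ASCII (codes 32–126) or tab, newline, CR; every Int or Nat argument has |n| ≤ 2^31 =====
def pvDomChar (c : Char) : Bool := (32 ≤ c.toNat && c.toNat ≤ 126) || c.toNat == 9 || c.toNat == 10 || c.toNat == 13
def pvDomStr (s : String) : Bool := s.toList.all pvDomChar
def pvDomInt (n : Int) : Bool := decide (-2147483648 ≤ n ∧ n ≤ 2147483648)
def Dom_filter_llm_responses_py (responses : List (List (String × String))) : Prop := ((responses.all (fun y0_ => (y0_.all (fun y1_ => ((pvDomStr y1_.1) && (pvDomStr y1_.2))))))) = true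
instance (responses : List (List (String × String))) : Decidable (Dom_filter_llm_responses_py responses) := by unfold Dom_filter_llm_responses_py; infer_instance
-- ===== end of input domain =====

-- B replaces A's reversed traversal + seen flag + re-reverse by a last-index forward pass and an index-conditioned filter (simpler decomposition, same O(n)).


-- resp["event"]: first-match association-list lookup; "" default is only reached outside Pre_ (where Python raises KeyError)
def pvEvent (r : List (String × String)) : String :=
  ((r.find? (fun p => p.1 == "event")).map (·.2)).getD ""

-- ===== PORT A =====
-- loop body of A's reversed traversal (if / elif, no else)
def pvStepA (st : Bool × List (List (String × String))) (resp : List (String × String)) :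
    Bool × List (List (String × String)) :=
  if pvEvent resp == "llm_response" && !st.1 then (true, st.2 ++ [resp])
  else if pvEvent resp != "llm_response" then (st.1, st.2 ++ [resp])
  else st

def filter_llm_responses_py (responses : List (List (String × String))) : List (List (String × String)) :=
  let st := responses.reverse.foldl pvStepA (false, [])
  st.2.reverse

-- ===== PORT B =====
-- first pass: index of the last llm_response (-1 if none)
def pvLastStep (acc : Int) (p : Int × List (String × String)) : Int :=
  if pvEvent p.2 == "llm_response" then p.1 else acc

def filter_llm_responses_py_alt (responses : List (List (String × String))) : List (List (String × String)) :=
  let lastIdx : Int := (PySem.List.enumerate responses).foldl pvLastStep (-1)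
  ((PySem.List.enumerate responses).filter
      (fun p => pvEvent p.2 != "llm_response" || p.1 == lastIdx)).map (·.2)

-- ===== PRECONDITION & SPEC =====
-- Pre_ excludes exactly the inputs where some dict lacks the key "event": there Python A raises KeyError.
def Pre_filter_llm_responses_py (responses : List (List (String × String))) : Prop :=
  (responses.all (fun r => r.any (fun p => p.1 == "event"))) = true
instance (responses : List (List (String × String))) : Decidable (Pre_filter_llm_responses_py responses) := by unfold Pre_filter_llm_responses_py; infer_instance
def pvWitness_filter_llm_responses_py : (List (List (String × String))) :=
  [[("event", "llm_response")], [("event", "articles")], [("event", "llm_response")]]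

def Spec_filter_llm_responses_py (responses : List (List (String × String))) (out : List (List (String × String))) : Prop := out = filter_llm_responses_py_alt responses
instance (responses : List (List (String × String))) (out : List (List (String × String))) : Decidable (Spec_filter_llm_responses_py responses out) := by unfold Spec_filter_llm_responses_py; infer_instance

-- ===== CLAIM (what is proved, stated in full; the proofs are below) =====
def Claim_equal_filter_llm_responses_py : Prop := ∀ (responses : List (List (String × String))), Dom_filter_llm_responses_py responses → Pre_filter_llm_responses_py responses → Spec_filter_llm_responses_py responses (filter_llm_responses_py responses)

-- ===== LEMMAS AND PROOFS =====

-- common spec recursion: keep r unless it is an llm_response with another one later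
def pvC : List (List (String × String)) → List (List (String × String))
  | [] => []
  | r :: t =>
    if pvEvent r == "llm_response" then
      (if t.any (fun x => pvEvent x == "llm_response") then pvC t else r :: pvC t)
    else r :: pvC t

-- what A's reversed fold accumulates
def pvKeepA : Bool → List (List (String × String)) → List (List (String × String))
  | _, [] => []
  | seen, r :: t =>
    if pvEvent r == "llm_response" && !seen then r :: pvKeepA true t
    else if !(pvEvent r == "llm_response") then r :: pvKeepA seen t
    else pvKeepA seen t

lemma foldlA_eq (xs : List (List (String × String))) : ∀ (seen : Bool) (acc : List (List (String × String))),
    xs.foldl pvStepA (seen, acc) =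
      (seen || xs.any (fun x => pvEvent x == "llm_response"), acc ++ pvKeepA seen xs) := by
  induction xs with
  | nil => intro seen acc; simp [pvKeepA]
  | cons r t ih =>
    intro seen acc
    by_cases h : pvEvent r = "llm_response" <;> cases seen <;>
      simp [pvStepA, pvKeepA, h, ih]

lemma A_cons (r : List (String × String)) (t : List (List (String × String))) :
    filter_llm_responses_py (r :: t) =
      (if pvEvent r == "llm_response" then
        (if t.any (fun x => pvEvent x == "llm_response") then filter_llm_responses_py t
         else r :: filter_llm_responses_py t)
       else r :: filter_llm_responses_py t) := by
  simp only [filter_llm_responses_py, List.reverse_cons, List.foldl_append, foldlA_eq]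
  by_cases h : pvEvent r = "llm_response" <;>
    by_cases h2 : t.any (fun x => pvEvent x == "llm_response") <;>
      simp [pvKeepA, h, h2, List.any_reverse]

lemma A_eq_C (l : List (List (String × String))) : filter_llm_responses_py l = pvC l := by
  induction l with
  | nil => rfl
  | cons r t ih => rw [A_cons, pvC]; split_ifs <;> simp [ih]

-- B-side: the filter, generalized over the enumeration start
def pvG (l : List (List (String × String))) (s L : Int) : List (List (String × String)) :=
  ((PySem.List.enumerate l s).filter
      (fun p => pvEvent p.2 != "llm_response" || p.1 == L)).map (·.2)

lemma last_no (l : List (List (String × String))) (h : l.any (fun x => pvEvent x == "llm_response") = false) :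
    ∀ (s a : Int), (PySem.List.enumerate l s).foldl pvLastStep a = a := by
  induction l with
  | nil => intro s a; simp [PySem.List.enumerate_nil]
  | cons r t ih =>
    simp only [List.any_cons, Bool.or_eq_false_iff] at h
    intro s a
    rw [PySem.List.enumerate_cons]
    simp [pvLastStep, h.1, ih h.2]

lemma last_ge (l : List (List (String × String))) (h : l.any (fun x => pvEvent x == "llm_response") = true) :
    ∀ (s a b : Int),
      s ≤ (PySem.List.enumerate l s).foldl pvLastStep a ∧
      (PySem.List.enumerate l s).foldl pvLastStep a = (PySem.List.enumerate l s).foldl pvLastStep b := by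
  induction l with
  | nil => simp at h
  | cons r t ih =>
    intro s a b
    simp only [PySem.List.enumerate_cons, List.foldl_cons]
    by_cases ht : t.any (fun x => pvEvent x == "llm_response") = true
    · have h1 := ih ht (s + 1) (pvLastStep a (s, r)) (pvLastStep b (s, r))
      exact ⟨by omega, h1.2⟩
    · simp only [List.any_cons, Bool.or_eq_true] at h
      have hr : (pvEvent r == "llm_response") = true := by
        rcases h with h | h
        · exact h
        · simp [ht] at h
      rw [last_no t (by simpa using ht), last_no t (by simpa using ht)]
      simp [pvLastStep, hr]

lemma G_all (l : List (List (String × String))) (h : l.any (fun x => pvEvent x == "llm_response") = false) :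
    ∀ (s L : Int), pvG l s L = l := by
  induction l with
  | nil => intro s L; simp [pvG, PySem.List.enumerate_nil]
  | cons r t ih =>
    simp only [List.any_cons, Bool.or_eq_false_iff] at h
    intro s L
    have h1 : ¬ pvEvent r = "llm_response" := by simpa using h.1
    have htail := ih h.2 (s + 1) L
    simp only [pvG] at htail
    simp [pvG, PySem.List.enumerate_cons, h1, htail]

lemma pvC_no (l : List (List (String × String))) (h : l.any (fun x => pvEvent x == "llm_response") = false) :
    pvC l = l := by
  induction l with
  | nil => rfl
  | cons r t ih =>
    simp only [List.any_cons, Bool.or_eq_false_iff] at h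
    have h1 : ¬ pvEvent r = "llm_response" := by simpa using h.1
    simp [pvC, h1, ih h.2]

lemma B_main (l : List (List (String × String))) : ∀ (s a : Int), a < s →
    pvG l s ((PySem.List.enumerate l s).foldl pvLastStep a) = pvC l := by
  induction l with
  | nil => intro s a _; simp [pvG, pvC, PySem.List.enumerate_nil]
  | cons r t ih =>
    intro s a ha
    set L := (PySem.List.enumerate (r :: t) s).foldl pvLastStep a with hL
    have hLstep : L = (PySem.List.enumerate t (s + 1)).foldl pvLastStep
        (if pvEvent r == "llm_response" then s else a) := by
      rw [hL]
      simp only [PySem.List.enumerate_cons, List.foldl_cons, pvLastStep]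
    by_cases ht : t.any (fun x => pvEvent x == "llm_response") = true
    · have hge := last_ge t ht (s + 1) (if pvEvent r == "llm_response" then s else a) a
      have hLge : s + 1 ≤ L := by rw [hLstep]; exact (last_ge t ht (s + 1) _ a).1
      have hLtail : L = (PySem.List.enumerate t (s + 1)).foldl pvLastStep a := by
        rw [hLstep]; exact hge.2
      have hne : s ≠ L := by omega
      have htail : pvG t (s + 1) L = pvC t := by
        rw [hLtail]; exact ih (s + 1) a (by omega)
      simp only [pvG] at htail
      by_cases hr : pvEvent r = "llm_response"
      · simp [pvG, PySem.List.enumerate_cons, pvC, hr, ht, hne, htail]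
      · simp [pvG, PySem.List.enumerate_cons, pvC, hr, htail]
    · have ht' : t.any (fun x => pvEvent x == "llm_response") = false := by simpa using ht
      have hCt : pvC t = t := pvC_no t ht'
      by_cases hr : pvEvent r = "llm_response"
      · have hLs : L = s := by rw [hLstep, last_no t ht']; simp [hr]
        have hkeep : pvG t (s + 1) s = t := G_all t ht' (s + 1) s
        simp only [pvG] at hkeep
        simp [pvG, PySem.List.enumerate_cons, pvC, hr, ht', hLs, hkeep, hCt]
      · have hLa : L = a := by rw [hLstep, last_no t ht']; simp [hr]
        have hne : s ≠ L := by omega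
        have hkeep : pvG t (s + 1) L = t := G_all t ht' (s + 1) L
        simp only [pvG] at hkeep
        simp [pvG, PySem.List.enumerate_cons, pvC, hr, hne, hkeep, hCt]

lemma B_eq_C (l : List (List (String × String))) : filter_llm_responses_py_alt l = pvC l := by
  have := B_main l 0 (-1) (by omega)
  simpa [filter_llm_responses_py_alt, pvG] using this

-- ===== VERDICT (by name: the statement is the Claim_ definition above) =====
theorem filter_llm_responses_py_spec : Claim_equal_filter_llm_responses_py := by
  intro responses _ _
  unfold Spec_filter_llm_responses_py
  rw [A_eq_C, B_eq_C]
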